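-- pv_equiv track=rewrite | github.com/tamirat-wubie/mullu-control-plane | mcoi/mcoi_runtime/migration/v1_to_v2_mapping.py | map_action_to_construct
-- ===== SOURCE A (Python) =====
-- from typing import Mapping
--
-- ACTION_PREFIX_MAP: Mapping[str, tuple[str, int]] = {
--     "budget.":            ("constraint",     1),
--     "tenant.":            ("boundary",       1),
--     "agent.invoke.":      ("execution",      5),
--     "llm.call.":          ("execution",      5),
--     "audit.write.":       ("validation",     4),
--     "governance.guard.":  ("validation",     4),
--     "workflow.step.":     ("transformation", 2),
--     "policy.":            ("constraint",     1),
--     "circuit.":           ("constraint",     1),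
--     "health.":            ("observation",    5),
-- }
--
-- DEFAULT_MAPPING: tuple[str, int] = ("execution", 5)
--
-- def map_action_to_construct(action: str) -> tuple[str, int]:
--     """Map a v1 action string to (construct_type, tier) for v2 synthesis.
--
--     Longest-prefix-wins. Falls back to DEFAULT_MAPPING for unknown actions.
--     """
--     if not action:
--         return DEFAULT_MAPPING
--     matches = sorted(
--         (prefix for prefix in ACTION_PREFIX_MAP if action.startswith(prefix)),
--         key=len,
--         reverse=True,
--     )
--     if matches:
--         return ACTION_PREFIX_MAP[matches[0]]
--     return DEFAULT_MAPPING
-- ===== SOURCE B (Python) =====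
-- from typing import Mapping
--
-- ACTION_PREFIX_MAP: Mapping[str, tuple[str, int]] = {
--     "budget.":            ("constraint",     1),
--     "tenant.":            ("boundary",       1),
--     "agent.invoke.":      ("execution",      5),
--     "llm.call.":          ("execution",      5),
--     "audit.write.":       ("validation",     4),
--     "governance.guard.":  ("validation",     4),
--     "workflow.step.":     ("transformation", 2),
--     "policy.":            ("constraint",     1),
--     "circuit.":           ("constraint",     1),
--     "health.":            ("observation",    5),
-- }
--
-- DEFAULT_MAPPING: tuple[str, int] = ("execution", 5)
--
-- def map_action_to_construct(action: str) -> tuple[str, int]: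
--     """Map a v1 action string to (construct_type, tier) for v2 synthesis.
--
--     Longest-prefix-wins, tracked in a single pass; DEFAULT_MAPPING if none matches.
--     """
--     best_len = -1
--     best_value = DEFAULT_MAPPING
--     for prefix, value in ACTION_PREFIX_MAP.items():
--         if len(prefix) > best_len and action.startswith(prefix):
--             best_len = len(prefix)
--             best_value = value
--     return best_value
-- ===== Notes on version B (the rewrite author's own statement) =====
-- stated objective: simpler
-- what changed: Replaced the build-a-list-of-matches + sort-by-length-descending + take-first-and-dict-lookup pipeline with a single pass over ACTION_PREFIX_MAP.items() that tracks the longest matching prefix's value in two accumulators (no intermediate list, no sort, no second lookup, no special empty-string branch).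
import Mathlib
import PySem

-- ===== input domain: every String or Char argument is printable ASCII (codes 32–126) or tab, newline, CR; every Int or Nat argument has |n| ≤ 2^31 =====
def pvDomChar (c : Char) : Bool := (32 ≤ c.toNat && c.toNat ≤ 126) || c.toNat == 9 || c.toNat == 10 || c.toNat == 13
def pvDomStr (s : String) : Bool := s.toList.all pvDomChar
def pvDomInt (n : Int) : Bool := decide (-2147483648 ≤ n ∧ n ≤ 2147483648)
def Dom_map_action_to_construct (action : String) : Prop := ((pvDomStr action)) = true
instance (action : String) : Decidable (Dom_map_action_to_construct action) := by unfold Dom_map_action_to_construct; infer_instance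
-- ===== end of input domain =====

-- B replaces A's collect-matches / sort-by-length / take-first-and-lookup pipeline with a single
-- best-tracking pass over the prefix map (objective: simpler).


-- ===== PORT A =====
def pvACTION_PREFIX_MAP : PySem.Dict String (String × Int) := PySem.Dict.ofList
  [("budget.",           ("constraint",     1)),
   ("tenant.",           ("boundary",       1)),
   ("agent.invoke.",     ("execution",      5)),
   ("llm.call.",         ("execution",      5)),
   ("audit.write.",      ("validation",     4)),
   ("governance.guard.", ("validation",     4)),
   ("workflow.step.",    ("transformation", 2)),
   ("policy.",           ("constraint",     1)),
   ("circuit.",          ("constraint",     1)),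
   ("health.",           ("observation",    5))]

def pvDEFAULT_MAPPING : String × Int := ("execution", 5)

def map_action_to_construct (action : String) : String × Int :=
  if action = "" then pvDEFAULT_MAPPING
  else
    let ms := PySem.List.sorted
      (pvACTION_PREFIX_MAP.keys.filter (fun p => PySem.Str.startswith action p))
      (fun p => PySem.Str.len p) true
    match ms with
    | m :: _ => pvACTION_PREFIX_MAP.getD m pvDEFAULT_MAPPING  -- key is present, so [] lookup = getD
    | [] => pvDEFAULT_MAPPING

-- ===== PORT B =====
def map_action_to_construct_alt (action : String) : String × Int :=
  (pvACTION_PREFIX_MAP.items.foldl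
    (fun best pv =>
      if ((PySem.Str.len pv.1 : Int) > best.1 ∧ PySem.Str.startswith action pv.1 = true)
      then ((PySem.Str.len pv.1 : Int), pv.2) else best)
    ((-1 : Int), pvDEFAULT_MAPPING)).2

-- ===== PRECONDITION & SPEC =====
def Spec_map_action_to_construct (action : String) (out : String × Int) : Prop := out = map_action_to_construct_alt action
instance (action : String) (out : String × Int) : Decidable (Spec_map_action_to_construct action out) := by unfold Spec_map_action_to_construct; infer_instance

-- ===== CLAIM (what is proved, stated in full; the proofs are below) =====
def Claim_equal_map_action_to_construct : Prop := ∀ (action : String), Dom_map_action_to_construct action → Spec_map_action_to_construct action (map_action_to_construct action)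

-- ===== LEMMAS AND PROOFS =====

-- two strings that both prefix `action` are nested; used to rule out a second match
theorem pv_no_double_match (action p q : String)
    (hpq : ¬(p.toList <+: q.toList ∨ q.toList <+: p.toList))
    (hp : PySem.Str.startswith action p = true) :
    PySem.Str.startswith action q = false := by
  cases hq : PySem.Str.startswith action q
  · rfl
  · exact absurd (List.prefix_or_prefix_of_prefix
      ((PySem.Chars.startswith_iff _ _).1 (by simpa [PySem.Str.startswith_eq] using hp))
      ((PySem.Chars.startswith_iff _ _).1 (by simpa [PySem.Str.startswith_eq] using hq))) hpq

-- ===== VERDICT (by name: the statement is the Claim_ definition above) =====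
theorem map_action_to_construct_spec : Claim_equal_map_action_to_construct := by
  unfold Claim_equal_map_action_to_construct Spec_map_action_to_construct
  intro action _
  have hk : pvACTION_PREFIX_MAP.keys = ["budget.", "tenant.", "agent.invoke.", "llm.call.",
      "audit.write.", "governance.guard.", "workflow.step.", "policy.", "circuit.", "health."] := by rfl
  have hi : pvACTION_PREFIX_MAP.items = [("budget.", ("constraint", 1)), ("tenant.", ("boundary", 1)),
      ("agent.invoke.", ("execution", 5)), ("llm.call.", ("execution", 5)), ("audit.write.", ("validation", 4)),
      ("governance.guard.", ("validation", 4)), ("workflow.step.", ("transformation", 2)),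
      ("policy.", ("constraint", 1)), ("circuit.", ("constraint", 1)), ("health.", ("observation", 5))] := by rfl
  by_cases hE : action = ""
  · subst hE; decide
  · -- at most ONE prefix of the map matches (no map prefix is a prefix of another):
    -- split on which one it is; in every case both ports reduce to the same closed value
    cases h1 : PySem.Str.startswith action "budget." with
    | true =>
      have h2 : PySem.Str.startswith action "tenant." = false :=
        pv_no_double_match action _ _ (by decide) h1
      have h3 : PySem.Str.startswith action "agent.invoke." = false :=
        pv_no_double_match action _ _ (by decide) h1
      have h4 : PySem.Str.startswith action "llm.call." = false :=
        pv_no_double_match action _ _ (by decide) h1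
      have h5 : PySem.Str.startswith action "audit.write." = false :=
        pv_no_double_match action _ _ (by decide) h1
      have h6 : PySem.Str.startswith action "governance.guard." = false :=
        pv_no_double_match action _ _ (by decide) h1
      have h7 : PySem.Str.startswith action "workflow.step." = false :=
        pv_no_double_match action _ _ (by decide) h1
      have h8 : PySem.Str.startswith action "policy." = false :=
        pv_no_double_match action _ _ (by decide) h1
      have h9 : PySem.Str.startswith action "circuit." = false :=
        pv_no_double_match action _ _ (by decide) h1
      have h10 : PySem.Str.startswith action "health." = false :=
        pv_no_double_match action _ _ (by decide) h1
      simp only [map_action_to_construct, map_action_to_construct_alt, if_neg hE, hk, hi,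
        List.filter_cons, List.filter_nil, List.foldl_cons, List.foldl_nil,
        h1, h2, h3, h4, h5, h6, h7, h8, h9, h10, Bool.false_eq_true, and_true, and_false, if_true, if_false]
      decide
    | false =>
      cases h2 : PySem.Str.startswith action "tenant." with
      | true =>
        have h3 : PySem.Str.startswith action "agent.invoke." = false :=
          pv_no_double_match action _ _ (by decide) h2
        have h4 : PySem.Str.startswith action "llm.call." = false :=
          pv_no_double_match action _ _ (by decide) h2
        have h5 : PySem.Str.startswith action "audit.write." = false :=
          pv_no_double_match action _ _ (by decide) h2
        have h6 : PySem.Str.startswith action "governance.guard." = false :=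
          pv_no_double_match action _ _ (by decide) h2
        have h7 : PySem.Str.startswith action "workflow.step." = false :=
          pv_no_double_match action _ _ (by decide) h2
        have h8 : PySem.Str.startswith action "policy." = false :=
          pv_no_double_match action _ _ (by decide) h2
        have h9 : PySem.Str.startswith action "circuit." = false :=
          pv_no_double_match action _ _ (by decide) h2
        have h10 : PySem.Str.startswith action "health." = false :=
          pv_no_double_match action _ _ (by decide) h2
        simp only [map_action_to_construct, map_action_to_construct_alt, if_neg hE, hk, hi,
          List.filter_cons, List.filter_nil, List.foldl_cons, List.foldl_nil,
          h1, h2, h3, h4, h5, h6, h7, h8, h9, h10, Bool.false_eq_true, and_true, and_false, if_true, if_false]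
        decide
      | false =>
        cases h3 : PySem.Str.startswith action "agent.invoke." with
        | true =>
          have h4 : PySem.Str.startswith action "llm.call." = false :=
            pv_no_double_match action _ _ (by decide) h3
          have h5 : PySem.Str.startswith action "audit.write." = false :=
            pv_no_double_match action _ _ (by decide) h3
          have h6 : PySem.Str.startswith action "governance.guard." = false :=
            pv_no_double_match action _ _ (by decide) h3
          have h7 : PySem.Str.startswith action "workflow.step." = false :=
            pv_no_double_match action _ _ (by decide) h3
          have h8 : PySem.Str.startswith action "policy." = false :=
            pv_no_double_match action _ _ (by decide) h3
          have h9 : PySem.Str.startswith action "circuit." = false :=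
            pv_no_double_match action _ _ (by decide) h3
          have h10 : PySem.Str.startswith action "health." = false :=
            pv_no_double_match action _ _ (by decide) h3
          simp only [map_action_to_construct, map_action_to_construct_alt, if_neg hE, hk, hi,
            List.filter_cons, List.filter_nil, List.foldl_cons, List.foldl_nil,
            h1, h2, h3, h4, h5, h6, h7, h8, h9, h10, Bool.false_eq_true, and_true, and_false, if_true, if_false]
          decide
        | false =>
          cases h4 : PySem.Str.startswith action "llm.call." with
          | true =>
            have h5 : PySem.Str.startswith action "audit.write." = false :=
              pv_no_double_match action _ _ (by decide) h4
            have h6 : PySem.Str.startswith action "governance.guard." = false :=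
              pv_no_double_match action _ _ (by decide) h4
            have h7 : PySem.Str.startswith action "workflow.step." = false :=
              pv_no_double_match action _ _ (by decide) h4
            have h8 : PySem.Str.startswith action "policy." = false :=
              pv_no_double_match action _ _ (by decide) h4
            have h9 : PySem.Str.startswith action "circuit." = false :=
              pv_no_double_match action _ _ (by decide) h4
            have h10 : PySem.Str.startswith action "health." = false :=
              pv_no_double_match action _ _ (by decide) h4
            simp only [map_action_to_construct, map_action_to_construct_alt, if_neg hE, hk, hi,
              List.filter_cons, List.filter_nil, List.foldl_cons, List.foldl_nil,
              h1, h2, h3, h4, h5, h6, h7, h8, h9, h10, Bool.false_eq_true, and_true, and_false, if_true, if_false]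
            decide
          | false =>
            cases h5 : PySem.Str.startswith action "audit.write." with
            | true =>
              have h6 : PySem.Str.startswith action "governance.guard." = false :=
                pv_no_double_match action _ _ (by decide) h5
              have h7 : PySem.Str.startswith action "workflow.step." = false :=
                pv_no_double_match action _ _ (by decide) h5
              have h8 : PySem.Str.startswith action "policy." = false :=
                pv_no_double_match action _ _ (by decide) h5
              have h9 : PySem.Str.startswith action "circuit." = false :=
                pv_no_double_match action _ _ (by decide) h5
              have h10 : PySem.Str.startswith action "health." = false :=
                pv_no_double_match action _ _ (by decide) h5
              simp only [map_action_to_construct, map_action_to_construct_alt, if_neg hE, hk, hi,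
                List.filter_cons, List.filter_nil, List.foldl_cons, List.foldl_nil,
                h1, h2, h3, h4, h5, h6, h7, h8, h9, h10, Bool.false_eq_true, and_true, and_false, if_true, if_false]
              decide
            | false =>
              cases h6 : PySem.Str.startswith action "governance.guard." with
              | true =>
                have h7 : PySem.Str.startswith action "workflow.step." = false :=
                  pv_no_double_match action _ _ (by decide) h6
                have h8 : PySem.Str.startswith action "policy." = false :=
                  pv_no_double_match action _ _ (by decide) h6
                have h9 : PySem.Str.startswith action "circuit." = false :=
                  pv_no_double_match action _ _ (by decide) h6
                have h10 : PySem.Str.startswith action "health." = false :=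
                  pv_no_double_match action _ _ (by decide) h6
                simp only [map_action_to_construct, map_action_to_construct_alt, if_neg hE, hk, hi,
                  List.filter_cons, List.filter_nil, List.foldl_cons, List.foldl_nil,
                  h1, h2, h3, h4, h5, h6, h7, h8, h9, h10, Bool.false_eq_true, and_true, and_false, if_true, if_false]
                decide
              | false =>
                cases h7 : PySem.Str.startswith action "workflow.step." with
                | true =>
                  have h8 : PySem.Str.startswith action "policy." = false :=
                    pv_no_double_match action _ _ (by decide) h7
                  have h9 : PySem.Str.startswith action "circuit." = false :=
                    pv_no_double_match action _ _ (by decide) h7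
                  have h10 : PySem.Str.startswith action "health." = false :=
                    pv_no_double_match action _ _ (by decide) h7
                  simp only [map_action_to_construct, map_action_to_construct_alt, if_neg hE, hk, hi,
                    List.filter_cons, List.filter_nil, List.foldl_cons, List.foldl_nil,
                    h1, h2, h3, h4, h5, h6, h7, h8, h9, h10, Bool.false_eq_true, and_true, and_false, if_true, if_false]
                  decide
                | false =>
                  cases h8 : PySem.Str.startswith action "policy." with
                  | true =>
                    have h9 : PySem.Str.startswith action "circuit." = false :=
                      pv_no_double_match action _ _ (by decide) h8
                    have h10 : PySem.Str.startswith action "health." = false :=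
                      pv_no_double_match action _ _ (by decide) h8
                    simp only [map_action_to_construct, map_action_to_construct_alt, if_neg hE, hk, hi,
                      List.filter_cons, List.filter_nil, List.foldl_cons, List.foldl_nil,
                      h1, h2, h3, h4, h5, h6, h7, h8, h9, h10, Bool.false_eq_true, and_true, and_false, if_true, if_false]
                    decide
                  | false =>
                    cases h9 : PySem.Str.startswith action "circuit." with
                    | true =>
                      have h10 : PySem.Str.startswith action "health." = false :=
                        pv_no_double_match action _ _ (by decide) h9
                      simp only [map_action_to_construct, map_action_to_construct_alt, if_neg hE, hk, hi,
                        List.filter_cons, List.filter_nil, List.foldl_cons, List.foldl_nil,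
                        h1, h2, h3, h4, h5, h6, h7, h8, h9, h10, Bool.false_eq_true, and_true, and_false, if_true, if_false]
                      decide
                    | false =>
                      cases h10 : PySem.Str.startswith action "health." with
                      | true =>
                        simp only [map_action_to_construct, map_action_to_construct_alt, if_neg hE, hk, hi,
                          List.filter_cons, List.filter_nil, List.foldl_cons, List.foldl_nil,
                          h1, h2, h3, h4, h5, h6, h7, h8, h9, h10, Bool.false_eq_true, and_true, and_false, if_true, if_false]
                        decide
                      | false =>
                        simp only [map_action_to_construct, map_action_to_construct_alt, if_neg hE, hk, hi,
                          List.filter_cons, List.filter_nil, List.foldl_cons, List.foldl_nil,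
                          h1, h2, h3, h4, h5, h6, h7, h8, h9, h10, Bool.false_eq_true, and_true, and_false, if_true, if_false]
                        decide
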